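-- pv_equiv track=rewrite | github.com/Lagom92/TIL | Algorithm/pro/Problem/more_spicy.py | solution
-- ===== SOURCE A (Python) =====
-- import heapq
--
-- def solution(scoville, K):
--     heapq.heapify(scoville)
--     cnt = 0
--     while True:
--         minV1 = heapq.heappop(scoville)
--
--         if minV1 >= K:
--             return cnt
--
--         try:
--             minV2 = heapq.heappop(scoville)
--         except:
--             return -1
--
--         value = minV1 + minV2*2
--         cnt += 1
--
--         heapq.heappush(scoville, value)
--
--     return None
--
-- scoville = [1, 2, 3, 9, 10, 12]
--
-- K = 7
-- ===== SOURCE B (Python) =====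
-- def solution(scoville, K):
--     # Return-value equivalence only: A mutates scoville into heap order in
--     # place, B works on a sorted copy and leaves the argument untouched.
--     s = sorted(scoville)
--     cnt = 0
--     while s:
--         m1 = s.pop(0)
--         if m1 >= K:
--             return cnt
--         if not s:
--             return -1
--         m2 = s.pop(0)
--         v = m1 + m2 * 2
--         i = 0
--         while i < len(s) and s[i] < v:
--             i += 1
--         s.insert(i, v)
--         cnt += 1
--     return -1
-- ===== Notes on version B (the rewrite author's own statement) =====
-- stated objective: alternative
-- what changed: Replaces the binary heap with a sorted list maintained by ordered insertion: sort once, pop the two smallest from the front, and insert the mixed value at its sorted position by a linear scan.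
import Mathlib
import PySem

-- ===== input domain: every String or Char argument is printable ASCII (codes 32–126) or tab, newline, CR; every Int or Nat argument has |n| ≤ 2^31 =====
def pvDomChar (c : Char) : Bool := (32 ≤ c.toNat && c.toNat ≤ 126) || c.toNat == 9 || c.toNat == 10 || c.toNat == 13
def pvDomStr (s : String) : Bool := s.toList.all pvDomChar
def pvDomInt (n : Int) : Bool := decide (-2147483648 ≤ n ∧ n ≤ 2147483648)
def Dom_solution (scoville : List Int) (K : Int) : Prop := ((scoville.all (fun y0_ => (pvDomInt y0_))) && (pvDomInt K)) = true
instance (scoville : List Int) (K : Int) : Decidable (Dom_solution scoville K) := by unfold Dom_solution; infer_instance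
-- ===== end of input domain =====

-- B replaces A's binary heap by a sorted list maintained with ordered insertion
-- (sort once, pop the two smallest from the front, insert the mix in order);
-- return-value equivalence only: A reorders the scoville argument in place.

-- ===== PORT A =====
-- heapq.heappop on a heap of Ints: returns the minimum value and the remaining
-- multiset (value-level semantics of the heap; exact, since only Int values are observed).
def pyHeappop (l : List Int) : Option (Int × List Int) :=
  match PySem.List.min? l (fun x => x) with
  | none => none
  | some m =>
    match PySem.List.remove? l m with
    | none => none
    | some r => some (m, r)

-- the 'while True' loop of A; fuel = list length (each iteration shrinks the heap by one)
def solutionLoop : Nat → List Int → Int → Int → Int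
  | 0, _, _, _ => -1
  | fuel+1, heap, K, cnt =>
    match pyHeappop heap with
    | none => -1                     -- unreachable under Pre_: first heappop raises on []
    | some (minV1, rest) =>
      if minV1 ≥ K then cnt
      else
        match pyHeappop rest with
        | none => -1                 -- the bare 'except: return -1'
        | some (minV2, rest2) =>
          solutionLoop fuel ((minV1 + minV2 * 2) :: rest2) K (cnt + 1)

def solution (scoville : List Int) (K : Int) : Int :=
  solutionLoop scoville.length scoville K 0

-- ===== PORT B =====
-- insert v before the first element that is not < v (B's linear scan + insert)
def insortB (v : Int) : List Int → List Int
  | [] => [v]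
  | y :: ys => if y < v then y :: insortB v ys else v :: y :: ys

def solutionAltLoop : Nat → List Int → Int → Int → Int
  | 0, _, _, _ => -1
  | fuel+1, s, K, cnt =>
    match s with
    | [] => -1                       -- 'while s' exits: return -1
    | m1 :: rest =>
      if m1 ≥ K then cnt
      else
        match rest with
        | [] => -1
        | m2 :: rest2 =>
          solutionAltLoop fuel (insortB (m1 + m2 * 2) rest2) K (cnt + 1)

def solution_alt (scoville : List Int) (K : Int) : Int :=
  solutionAltLoop scoville.length (PySem.List.sorted scoville (fun x => x) false) K 0

-- ===== PRECONDITION & SPEC =====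
-- Pre_ excludes only the empty list, on which A's first heappop raises IndexError (it is outside the try).
def Pre_solution (scoville : List Int) (K : Int) : Prop := scoville ≠ []
instance (scoville : List Int) (K : Int) : Decidable (Pre_solution scoville K) := by unfold Pre_solution; infer_instance
def pvWitness_solution : List Int × Int := ([1, 2, 3, 9, 10, 12], 7)

def Spec_solution (scoville : List Int) (K : Int) (out : Int) : Prop := out = solution_alt scoville K
instance (scoville : List Int) (K : Int) (out : Int) : Decidable (Spec_solution scoville K out) := by unfold Spec_solution; infer_instance

-- ===== CLAIM (what is proved, stated in full; the proofs are below) =====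
def Claim_equal_solution : Prop := ∀ (scoville : List Int) (K : Int), Dom_solution scoville K → Pre_solution scoville K → Spec_solution scoville K (solution scoville K)

-- ===== LEMMAS AND PROOFS =====

theorem insortB_perm (v : Int) (ys : List Int) : (insortB v ys).Perm (v :: ys) := by
  induction ys with
  | nil => simp [insortB]
  | cons y ys ih =>
    simp only [insortB]
    split
    · exact ((ih.cons y).trans (List.Perm.swap v y ys))
    · exact List.Perm.refl _

theorem insortB_pairwise (v : Int) (ys : List Int) (h : ys.Pairwise (· ≤ ·)) :
    (insortB v ys).Pairwise (· ≤ ·) := by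
  induction ys with
  | nil => simp [insortB]
  | cons y ys ih =>
    rcases List.pairwise_cons.mp h with ⟨hy, hys⟩
    simp only [insortB]
    split
    · rename_i hlt
      refine List.pairwise_cons.mpr ⟨?_, ih hys⟩
      intro b hb
      rcases List.mem_cons.mp ((insortB_perm v ys).mem_iff.mp hb) with rfl | hb
      · omega
      · exact hy b hb
    · rename_i hnlt
      refine List.pairwise_cons.mpr ⟨?_, h⟩
      intro b hb
      rcases List.mem_cons.mp hb with rfl | hb
      · omega
      · exact le_trans (by omega) (hy b hb)

-- popping A's heap that is a permutation of sorted (m :: t) yields m and a permutation of t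
theorem pyHeappop_of_perm (l : List Int) (m : Int) (t : List Int)
    (hp : l.Perm (m :: t)) (hs : (m :: t).Pairwise (· ≤ ·)) :
    ∃ r, pyHeappop l = some (m, r) ∧ r.Perm t := by
  have hm_mem : m ∈ l := hp.mem_iff.mpr (by simp)
  have hmin : ∀ y ∈ l, m ≤ y := by
    intro y hy
    rcases List.mem_cons.mp (hp.mem_iff.mp hy) with rfl | hy
    · exact le_refl _
    · exact (List.pairwise_cons.mp hs).1 y hy
  have hne : l ≠ [] := by intro h; subst h; simp at hm_mem
  cases hm' : PySem.List.min? l (fun x : Int => x) with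
  | none => exact absurd ((PySem.List.min?_eq_none_iff l _).mp hm') hne
  | some m' =>
  have hm'_mem : m' ∈ l := PySem.List.min?_mem hm'
  have h1 : m' ≤ m := PySem.List.min?_isMin hm' m hm_mem
  have h2 : m ≤ m' := hmin m' hm'_mem
  have hmm : m' = m := le_antisymm h1 h2
  subst hmm
  have hrem : PySem.List.remove? l m' = some (l.erase m') :=
    PySem.List.remove?_eq_some_erase l m' hm'_mem
  refine ⟨l.erase m', ?_, ?_⟩
  · simp [pyHeappop, hm', hrem]
  · have := hp.erase m'
    simpa using this

theorem loop_eq (fuel : Nat) (l s : List Int) (K cnt : Int)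
    (hp : l.Perm s) (hs : s.Pairwise (· ≤ ·)) :
    solutionLoop fuel l K cnt = solutionAltLoop fuel s K cnt := by
  induction fuel generalizing l s cnt with
  | zero => rfl
  | succ f ih =>
    cases s with
    | nil =>
      have hl : l = [] := List.Perm.eq_nil hp
      subst hl
      simp [solutionLoop, solutionAltLoop, pyHeappop, PySem.List.min?]
    | cons m1 rest =>
      obtain ⟨r, hpop, hr⟩ := pyHeappop_of_perm l m1 rest hp hs
      have hs' : rest.Pairwise (· ≤ ·) := (List.pairwise_cons.mp hs).2
      simp only [solutionLoop, solutionAltLoop, hpop]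
      split
      · rfl
      · cases rest with
        | nil =>
          have : r = [] := List.Perm.eq_nil hr
          subst this
          simp [pyHeappop, PySem.List.min?]
        | cons m2 rest2 =>
          obtain ⟨r2, hpop2, hr2⟩ := pyHeappop_of_perm r m2 rest2 hr hs'
          simp only [hpop2]
          exact ih _ _ _ ((hr2.cons _).trans (insortB_perm _ rest2).symm)
            (insortB_pairwise _ _ (List.pairwise_cons.mp hs').2)

-- ===== VERDICT (by name: the statement is the Claim_ definition above) =====
theorem solution_spec : Claim_equal_solution := by
  intro scoville K _ _
  unfold Spec_solution solution solution_alt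
  exact loop_eq scoville.length scoville _ K 0
    (PySem.List.sorted_perm scoville (fun x => x) false).symm
    (PySem.List.sorted_pairwise scoville (fun x => x))
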